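-- pv_equiv track=rewrite | github.com/itsmehemant7/hideme | encoder.py | crypt
-- ===== SOURCE A (Python) =====
-- def crypt(message):
--     new_message=""
--     for e in message:
--       if ord(e)<254:
--           new_message+=chr(ord(e)+1)
--       else:
--           new_message += chr(ord(e))
--     return new_message
-- ===== SOURCE B (Python) =====
-- def crypt(message):
--     # divide and conquer: shift halves independently, then concatenate
--     n = len(message)
--     if n == 0:
--         return ""
--     if n == 1:
--         o = ord(message)
--         return chr(o + 1) if o < 254 else message
--     mid = n // 2
--     return crypt(message[:mid]) + crypt(message[mid:])
-- ===== Notes on version B (the rewrite author's own statement) =====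
-- stated objective: alternative
-- what changed: Replaces A's linear left-to-right accumulator loop by a divide-and-conquer recursion: split the string in half, recursively encode each half, and concatenate, with the single-character shift (capped at 254) as the base case.
import Mathlib
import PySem

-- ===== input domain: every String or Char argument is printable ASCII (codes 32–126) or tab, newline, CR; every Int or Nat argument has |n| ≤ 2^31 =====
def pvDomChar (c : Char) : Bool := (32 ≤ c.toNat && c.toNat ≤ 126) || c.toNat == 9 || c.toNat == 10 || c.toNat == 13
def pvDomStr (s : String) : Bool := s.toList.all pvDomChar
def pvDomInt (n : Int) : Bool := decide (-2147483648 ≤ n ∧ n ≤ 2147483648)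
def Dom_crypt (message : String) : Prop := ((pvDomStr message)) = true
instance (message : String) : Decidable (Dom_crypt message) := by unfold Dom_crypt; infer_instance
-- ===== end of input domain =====

-- B replaces A's linear accumulator loop by a divide-and-conquer recursion (alternative decomposition, same result).

-- ===== PORT A =====
-- new_message accumulator, one step per character, in order
def crypt (message : String) : String :=
  message.toList.foldl
    (fun new_message e =>
      if e.toNat < 254 then new_message ++ (Char.ofNat (e.toNat + 1)).toString
      else new_message ++ (Char.ofNat e.toNat).toString)
    ""

-- ===== PORT B =====
-- message[:mid] / message[mid:] with 0 ≤ mid ≤ len are exactly List.take/List.drop on the char list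
def cryptGo (l : List Char) : List Char :=
  match l with
  | [] => []
  | [c] => if c.toNat < 254 then [Char.ofNat (c.toNat + 1)] else [c]
  | a :: b :: rest =>
    cryptGo ((a :: b :: rest).take ((a :: b :: rest).length / 2)) ++
      cryptGo ((a :: b :: rest).drop ((a :: b :: rest).length / 2))
termination_by l.length
decreasing_by
  · simp [List.length_take]; omega
  · simp; omega

def crypt_alt (message : String) : String := String.ofList (cryptGo message.toList)

-- ===== PRECONDITION & SPEC =====
def Spec_crypt (message : String) (out : String) : Prop := out = crypt_alt message
instance (message : String) (out : String) : Decidable (Spec_crypt message out) := by unfold Spec_crypt; infer_instance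

-- ===== CLAIM (what is proved, stated in full; the proofs are below) =====
def Claim_equal_crypt : Prop := ∀ (message : String), Dom_crypt message → Spec_crypt message (crypt message)

-- ===== LEMMAS AND PROOFS =====

def shift1 (c : Char) : Char :=
  if c.toNat < 254 then Char.ofNat (c.toNat + 1) else c

lemma cryptGo_eq_map (l : List Char) : cryptGo l = l.map shift1 := by
  induction l using cryptGo.induct with
  | case1 => simp [cryptGo]
  | case2 c h => simp [cryptGo, shift1, h]
  | case3 c h => simp [cryptGo, shift1, h]
  | case4 a b rest ih1 ih2 =>
    rw [cryptGo, ih1, ih2, ← List.map_append, List.take_append_drop]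

lemma loopA (l : List Char) (acc : String) :
    (l.foldl
      (fun new_message e =>
        if e.toNat < 254 then new_message ++ (Char.ofNat (e.toNat + 1)).toString
        else new_message ++ (Char.ofNat e.toNat).toString)
      acc)
    = acc ++ String.ofList (l.map shift1) := by
  induction l generalizing acc with
  | nil => simp
  | cons c rest ih =>
    by_cases h : c.toNat < 254 <;>
      simp only [List.foldl_cons, List.map_cons, h, shift1] <;>
      rw [ih] <;> simp [String.ext_iff]

-- ===== VERDICT (by name: the statement is the Claim_ definition above) =====
theorem crypt_spec : Claim_equal_crypt := by
  intro message hdom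
  unfold Spec_crypt crypt crypt_alt
  rw [loopA, cryptGo_eq_map]
  simp
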